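-- pv_equiv track=rewrite | github.com/qgzm/LeetCode | LCP/61. 气温变化趋势.py | temperatureTrend
-- ===== SOURCE A (Python) =====
-- from typing import List
--
-- def temperatureTrend(temperatureA: List[int], temperatureB: List[int]) -> int:
--     diff1 = [temperatureA[i] - temperatureA[i - 1] for i in range(1, len(temperatureA))]
--     diff2 = [temperatureB[i] - temperatureB[i - 1] for i in range(1, len(temperatureB))]
--
--     res = cur = 0
--     for i, j in zip(diff1, diff2):
--         if i * j > 0 or i == j == 0:
--             cur += 1
--         else:
--             cur = 0
--         res = max(res, cur)
--     return res
-- ===== SOURCE B (Python) =====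
-- from typing import List
--
-- def temperatureTrend(temperatureA: List[int], temperatureB: List[int]) -> int:
--     def sign(x: int) -> int:
--         return (x > 0) - (x < 0)
--
--     m = [sign(a2 - a1) == sign(b2 - b1)
--          for (a1, a2), (b1, b2) in zip(zip(temperatureA, temperatureA[1:]),
--                                        zip(temperatureB, temperatureB[1:]))]
--
--     n = len(m)
--     res = 0
--     i = 0
--     while i < n:
--         k = i
--         while k < n and m[k]:
--             k += 1
--         res = max(res, k - i)
--         i = k + 1
--     return res
-- ===== Notes on version B (the rewrite author's own statement) =====
-- stated objective: alternative
-- what changed: B replaces A's two index-built difference lists and per-element res/cur accumulator loop by a sign-match boolean list over zipped adjacent pairs and a run-skipping recursion (count the leading run of matches, recurse past the break) taking the max of run lengths.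
import Mathlib
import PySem

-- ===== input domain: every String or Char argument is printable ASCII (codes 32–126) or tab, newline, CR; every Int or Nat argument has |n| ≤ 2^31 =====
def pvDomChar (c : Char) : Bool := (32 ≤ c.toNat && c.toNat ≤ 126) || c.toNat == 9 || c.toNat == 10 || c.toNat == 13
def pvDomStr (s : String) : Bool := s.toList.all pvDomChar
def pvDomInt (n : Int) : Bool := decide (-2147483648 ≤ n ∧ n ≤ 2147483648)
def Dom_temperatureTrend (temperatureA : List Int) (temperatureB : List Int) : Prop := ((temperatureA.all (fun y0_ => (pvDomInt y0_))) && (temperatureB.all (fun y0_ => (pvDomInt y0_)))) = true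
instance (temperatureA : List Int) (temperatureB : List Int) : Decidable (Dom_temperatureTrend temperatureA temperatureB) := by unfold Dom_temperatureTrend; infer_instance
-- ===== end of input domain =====

-- B replaces A's two index-built diff lists and per-element res/cur accumulator by a sign-match
-- boolean list over zipped adjacent pairs and a run-skipping recursion (alternative decomposition).


-- ===== PORT A =====
def temperatureTrend (temperatureA : List Int) (temperatureB : List Int) : Int :=
  let diff1 := (PySem.List.pyRange 1 (temperatureA.length : Int) 1).map
      (fun i => PySem.List.pyGetD temperatureA i 0 - PySem.List.pyGetD temperatureA (i - 1) 0)
  let diff2 := (PySem.List.pyRange 1 (temperatureB.length : Int) 1).map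
      (fun i => PySem.List.pyGetD temperatureB i 0 - PySem.List.pyGetD temperatureB (i - 1) 0)
  let st := (List.zip diff1 diff2).foldl
      (fun (st : Int × Int) (ij : Int × Int) =>
        let cur := if ij.1 * ij.2 > 0 ∨ (ij.1 = ij.2 ∧ ij.2 = 0) then st.2 + 1 else 0
        (max st.1 cur, cur))
      (0, 0)
  st.1

-- ===== PORT B =====
-- sign(x) = (x > 0) - (x < 0)
def pySign (x : Int) : Int := (if x > 0 then (1 : Int) else 0) - (if x < 0 then (1 : Int) else 0)

-- inner while: advance k past the run of True starting at i (k < n and m[k]);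
-- fuel only makes the loop structurally total (it is started with fuel ≥ n - i)
def scanRun (m : List Bool) (n : Nat) : Nat → Nat → Nat
  | 0, i => i
  | fuel + 1, i => if i < n ∧ m.getD i false then scanRun m n fuel (i + 1) else i

-- outer while: res/i loop over the runs (same fuel discipline)
def runScan (m : List Bool) (n : Nat) : Nat → Int → Nat → Int
  | 0, res, _ => res
  | fuel + 1, res, i =>
    if i < n then
      let k := scanRun m n (n - i) i
      runScan m n fuel (max res ((k : Int) - (i : Int))) (k + 1)
    else res

def temperatureTrend_alt (temperatureA : List Int) (temperatureB : List Int) : Int :=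
  let m := (List.zip (List.zip temperatureA (PySem.List.slice temperatureA (some 1) none))
                     (List.zip temperatureB (PySem.List.slice temperatureB (some 1) none))).map
      (fun p => pySign (p.1.2 - p.1.1) == pySign (p.2.2 - p.2.1))
  runScan m m.length m.length 0 0

-- ===== PRECONDITION & SPEC =====
def Spec_temperatureTrend (temperatureA : List Int) (temperatureB : List Int) (out : Int) : Prop := out = temperatureTrend_alt temperatureA temperatureB
instance (temperatureA : List Int) (temperatureB : List Int) (out : Int) : Decidable (Spec_temperatureTrend temperatureA temperatureB out) := by unfold Spec_temperatureTrend; infer_instance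

-- ===== CLAIM (what is proved, stated in full; the proofs are below) =====
def Claim_equal_temperatureTrend : Prop := ∀ (temperatureA : List Int) (temperatureB : List Int), Dom_temperatureTrend temperatureA temperatureB → Spec_temperatureTrend temperatureA temperatureB (temperatureTrend temperatureA temperatureB)

-- ===== LEMMAS AND PROOFS =====

-- proof-side characterisation: the longest run of True, by head-run recursion
def longestRun : List Bool → Int
  | [] => 0
  | b :: t =>
    let k := ((b :: t).takeWhile (fun x => x)).length
    max (k : Int) (longestRun ((b :: t).drop (k + 1)))
termination_by ms => ms.length
decreasing_by simp

-- A's diff-list comprehension equals the adjacent-pair differences over zip(l, l[1:]).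
lemma diff_eq (l : List Int) :
    (PySem.List.pyRange 1 (l.length : Int) 1).map
        (fun i => PySem.List.pyGetD l i 0 - PySem.List.pyGetD l (i - 1) 0)
      = (List.zip l l.tail).map (fun p => p.2 - p.1) := by
  apply List.ext_getElem
  · simp [PySem.List.length_pyRange_one, List.length_zip]
  · intro k h1 h2
    have hk : k < l.length - 1 := by
      simpa [PySem.List.length_pyRange_one] using h1
    simp only [List.getElem_map, PySem.List.getElem_pyRange_one, List.getElem_zip]
    have h1k : (1 : Int) + k = ((k + 1 : Nat) : Int) := by push_cast; ring
    have h2k : ((k + 1 : Nat) : Int) - 1 = ((k : Nat) : Int) := by push_cast; ring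
    rw [h1k, h2k, PySem.List.pyGetD_natCast, PySem.List.pyGetD_natCast,
        List.getD_eq_getElem?_getD, List.getD_eq_getElem?_getD,
        List.getElem?_eq_getElem (by omega : k + 1 < l.length),
        List.getElem?_eq_getElem (by omega : k < l.length)]
    simp [List.getElem_tail]

-- A's loop condition is exactly "equal Python signs".
lemma cond_iff (i j : Int) : (i * j > 0 ∨ (i = j ∧ j = 0)) ↔ pySign i = pySign j := by
  unfold pySign
  constructor
  · intro h
    rcases h with h | ⟨h1, h2⟩
    · rcases mul_pos_iff.mp h with ⟨h1, h2⟩ | ⟨h1, h2⟩ <;> split_ifs <;> omega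
    · split_ifs <;> omega
  · intro h
    rcases lt_trichotomy i 0 with hi|hi|hi <;> rcases lt_trichotomy j 0 with hj|hj|hj
    · exact Or.inl (mul_pos_of_neg_of_neg hi hj)
    · exfalso; split_ifs at h <;> omega
    · exfalso; split_ifs at h <;> omega
    · exfalso; split_ifs at h <;> omega
    · right; omega
    · exfalso; split_ifs at h <;> omega
    · exfalso; split_ifs at h <;> omega
    · exfalso; split_ifs at h <;> omega
    · exact Or.inl (mul_pos hi hj)

-- one unfolding of longestRun, valid for every list
lemma longestRun_unfold (m : List Bool) :
    longestRun m = max ((m.takeWhile (fun x => x)).length : Int)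
      (longestRun (m.drop ((m.takeWhile (fun x => x)).length + 1))) := by
  cases m with
  | nil => simp [longestRun]
  | cons b t => rw [longestRun]

lemma longestRun_nonneg (m : List Bool) : 0 ≤ longestRun m := by
  rw [longestRun_unfold m]
  exact le_max_of_le_left (Int.natCast_nonneg _)

-- the step of A's loop, on the boolean match value
def bbStep (st : Int × Int) (b : Bool) : Int × Int :=
  let cur := if b then st.2 + 1 else 0
  (max st.1 cur, cur)

-- invariant of A's loop: its final res is the running max over the streaks
lemma fold_eq (m : List Bool) : ∀ res cur : Int, 0 ≤ cur → cur ≤ res →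
    (m.foldl bbStep (res, cur)).1
      = max res (max (cur + ((m.takeWhile (fun x => x)).length : Int))
          (longestRun (m.drop ((m.takeWhile (fun x => x)).length + 1)))) := by
  induction m with
  | nil =>
    intro res cur h0 hcr
    simp only [List.foldl_nil, List.takeWhile_nil, List.length_nil, List.drop_nil]
    have h1 : longestRun [] = 0 := by rw [longestRun]
    rw [h1]; push_cast; omega
  | cons b t ih =>
    intro res cur h0 hcr
    cases b
    · -- matching streak broken: cur resets to 0
      have hstep : bbStep (res, cur) false = (max res 0, 0) := by simp [bbStep]
      rw [List.foldl_cons, hstep, ih (max res 0) 0 le_rfl (le_max_right _ _)]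
      have htw : (false :: t).takeWhile (fun x => x) = [] := by simp
      rw [htw]
      simp only [List.length_nil, Nat.cast_zero, List.drop_one,
        List.tail_cons, add_zero, zero_add]
      rw [← longestRun_unfold t]
      have := longestRun_nonneg t
      omega
    · -- streak extends: cur becomes cur + 1
      have hstep : bbStep (res, cur) true = (max res (cur + 1), cur + 1) := by simp [bbStep]
      rw [List.foldl_cons, hstep, ih (max res (cur + 1)) (cur + 1) (by omega) (le_max_right _ _)]
      have htw : (true :: t).takeWhile (fun x => x) = true :: t.takeWhile (fun x => x) := by
        simp
      rw [htw]
      simp only [List.length_cons]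
      have hdrop : (true :: t).drop ((t.takeWhile (fun x => x)).length + 1 + 1)
          = t.drop ((t.takeWhile (fun x => x)).length + 1) := by
        rw [List.drop_succ_cons]
      rw [hdrop]
      push_cast
      omega

-- pointwise: A's loop body is bbStep applied to the sign-match boolean
lemma step_eq (st : Int × Int) (i j : Int) :
    (let cur := if i * j > 0 ∨ (i = j ∧ j = 0) then st.2 + 1 else 0
     (max st.1 cur, cur)) = bbStep st (pySign i == pySign j) := by
  by_cases h : i * j > 0 ∨ (i = j ∧ j = 0)
  · simp only [bbStep, if_pos h, beq_iff_eq, (cond_iff i j).mp h, if_pos]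
  · have hne : ¬ pySign i = pySign j := fun hh => h ((cond_iff i j).mpr hh)
    simp only [bbStep, if_neg h, beq_iff_eq, hne, if_neg, not_false_iff]

-- A's loop from (0,0) computes exactly longestRun
lemma longestRun_eq_fold (m : List Bool) : longestRun m = (m.foldl bbStep (0, 0)).1 := by
  rw [fold_eq m 0 0 le_rfl le_rfl, longestRun_unfold m]
  have := longestRun_nonneg (m.drop ((m.takeWhile (fun x => x)).length + 1))
  omega

-- the inner while lands exactly past the leading True-run of m.drop i
lemma scanRun_eq (m : List Bool) : ∀ fuel i, m.length - i ≤ fuel →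
    scanRun m m.length fuel i = i + ((m.drop i).takeWhile (fun x => x)).length := by
  intro fuel
  induction fuel with
  | zero =>
    intro i h
    rw [scanRun]
    simp [List.drop_eq_nil_of_le (by omega : m.length ≤ i)]
  | succ d ih =>
    intro i h
    by_cases hi : i < m.length
    · have hdrop : m.drop i = m[i] :: m.drop (i + 1) := (List.drop_eq_getElem_cons hi)
      by_cases hb : m[i] = true
      · have hc : i < m.length ∧ m.getD i false := by
          refine ⟨hi, ?_⟩
          rw [List.getD_eq_getElem?_getD, List.getElem?_eq_getElem hi]
          simpa using hb
        rw [scanRun, if_pos hc, ih (i + 1) (by omega), hdrop]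
        simp [hb]
        omega
      · have hc : ¬ (i < m.length ∧ m.getD i false) := by
          intro hcc
          apply hb
          have h2 := hcc.2
          rw [List.getD_eq_getElem?_getD, List.getElem?_eq_getElem hi] at h2
          simpa using h2
        rw [scanRun, if_neg hc, hdrop]
        simp [hb]
    · rw [scanRun]
      have hc : ¬ (i < m.length ∧ m.getD i false) := fun hcc => hi hcc.1
      rw [if_neg hc]
      simp [List.drop_eq_nil_of_le (by omega : m.length ≤ i)]

-- the outer while keeps the running max of run lengths: it computes longestRun of the remainder
lemma runScan_eq (m : List Bool) : ∀ fuel i res, m.length - i ≤ fuel → 0 ≤ res →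
    runScan m m.length fuel res i = max res (longestRun (m.drop i)) := by
  intro fuel
  induction fuel with
  | zero =>
    intro i res h h0
    rw [runScan, List.drop_eq_nil_of_le (by omega : m.length ≤ i)]
    have hl : longestRun [] = 0 := by rw [longestRun]
    omega
  | succ d ih =>
    intro i res h h0
    by_cases hi : i < m.length
    · rw [runScan]
      simp only [if_pos hi]
      have hk := scanRun_eq m (m.length - i) i le_rfl
      set k := scanRun m m.length (m.length - i) i with hkdef
      have hlen : ((m.drop i).takeWhile (fun x => x)).length = k - i := by omega
      have hdd : (m.drop i).drop (((m.drop i).takeWhile (fun x => x)).length + 1)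
          = m.drop (k + 1) := by
        rw [List.drop_drop, hlen]
        congr 1
        omega
      have hki : ((k : Int) - (i : Int)) = (((m.drop i).takeWhile (fun x => x)).length : Int) := by
        rw [hlen]; omega
      rw [ih (k + 1) (max res ((k : Int) - (i : Int))) (by omega) (le_max_of_le_right (by omega)),
          longestRun_unfold (m.drop i), hdd, hki]
      omega
    · rw [runScan]
      simp only [if_neg hi]
      rw [List.drop_eq_nil_of_le (by omega : m.length ≤ i)]
      have hl : longestRun [] = 0 := by rw [longestRun]
      omega

-- ===== VERDICT (by name: the statement is the Claim_ definition above) =====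
theorem temperatureTrend_spec : Claim_equal_temperatureTrend := by
  intro A B _
  show temperatureTrend A B = temperatureTrend_alt A B
  unfold temperatureTrend temperatureTrend_alt
  rw [PySem.List.slice_from_one, PySem.List.slice_from_one, diff_eq, diff_eq]
  dsimp only
  rw [runScan_eq _ _ 0 0 (by omega) le_rfl]
  simp only [List.drop_zero]
  rw [max_eq_right (longestRun_nonneg _), longestRun_eq_fold]
  rw [List.zip_map, List.foldl_map, List.foldl_map]
  congr 1
  apply PySem.List.foldl_congr_mem
  intro acc q _
  dsimp only [Prod.map]
  exact step_eq acc (q.1.2 - q.1.1) (q.2.2 - q.2.1)
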